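-- pv_equiv track=rewrite | github.com/suizokukan/katal | faked/src/board_txtrepr.py | get_console_repr_of_board__1
-- ===== SOURCE A (Python) =====
-- def get_console_repr_of_board__1(consolecharacters_table, xmin, ymin, xmax, ymax):
--     """
--             get_console_repr_of_board__1()
--
--             first layer : background character + lines characters
--
--             function called by get_board_textrepr().
--     """
--     consolecharacters_table = consolecharacters_table
--     for y in range((ymin-1)*4, (ymax+1)*4):
--         for x in range((xmin-1)*4, (xmax+1)*4):
--
--             # background character :
--             consolecharacters_table[(x, y)] = " "
--
--             # lines character :
--             if x%4 == 0 and (y-2)%4 == 0: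
--                 consolecharacters_table[(x, y)] = "."
--
--     return consolecharacters_table
-- ===== SOURCE B (Python) =====
-- def get_console_repr_of_board__1(consolecharacters_table, xmin, ymin, xmax, ymax):
--     """Fill pass then a targeted dot pass striding only over the marker cells."""
--     x0 = (xmin - 1) * 4
--     x1 = (xmax + 1) * 4
--     y0 = (ymin - 1) * 4
--     y1 = (ymax + 1) * 4
--     # first pass: background character everywhere
--     for y in range(y0, y1):
--         for x in range(x0, x1):
--             consolecharacters_table[(x, y)] = " "
--     # second pass: stride directly over the dot coordinates
--     for y in range(y0 + 2, y1, 4):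
--         for x in range(x0, x1, 4):
--             consolecharacters_table[(x, y)] = "."
--     return consolecharacters_table
-- ===== Notes on version B (the rewrite author's own statement) =====
-- stated objective: alternative
-- what changed: A tests every grid cell with a modular branch and overwrites in place; B fills the whole grid with spaces in one branch-free pass and then runs a second pass striding only over the dot coordinates (step 4), touching exactly the marker cells.
import Mathlib
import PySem

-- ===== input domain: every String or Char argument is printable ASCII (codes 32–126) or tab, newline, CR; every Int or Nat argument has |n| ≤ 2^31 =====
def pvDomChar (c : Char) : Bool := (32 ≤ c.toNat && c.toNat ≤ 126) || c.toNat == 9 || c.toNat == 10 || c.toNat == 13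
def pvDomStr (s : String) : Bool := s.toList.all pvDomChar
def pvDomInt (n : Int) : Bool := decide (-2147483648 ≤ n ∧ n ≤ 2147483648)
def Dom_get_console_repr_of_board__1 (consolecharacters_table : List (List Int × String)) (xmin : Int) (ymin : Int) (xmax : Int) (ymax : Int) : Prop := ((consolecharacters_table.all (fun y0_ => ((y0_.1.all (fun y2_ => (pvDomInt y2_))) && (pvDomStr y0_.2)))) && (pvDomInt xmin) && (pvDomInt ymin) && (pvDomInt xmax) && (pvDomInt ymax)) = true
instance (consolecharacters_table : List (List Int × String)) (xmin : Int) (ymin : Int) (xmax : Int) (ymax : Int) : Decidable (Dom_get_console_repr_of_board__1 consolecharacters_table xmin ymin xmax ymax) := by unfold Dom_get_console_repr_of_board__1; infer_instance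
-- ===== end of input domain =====

-- B replaces A's per-cell modular branch by a branch-free space-filling pass followed by a
-- second pass that strides (step 4) directly over the dot coordinates; return value mutates
-- the same dict (A mutates its argument in place in Python; equivalence here is about the
-- returned dict contents, which are the mutated dict itself in both programs).

-- ===== PORT A =====
def get_console_repr_of_board__1 (consolecharacters_table : List (List Int × String)) (xmin : Int) (ymin : Int) (xmax : Int) (ymax : Int) : List (List Int × String) :=
  let d0 : PySem.Dict (List Int) String := ⟨consolecharacters_table⟩
  let d := (PySem.List.pyRange ((ymin-1)*4) ((ymax+1)*4) 1).foldl (fun d y =>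
    (PySem.List.pyRange ((xmin-1)*4) ((xmax+1)*4) 1).foldl (fun d x =>
      -- background character
      let d1 := d.insert [x, y] " "
      -- lines character
      if PySem.Int.mod x 4 == 0 && PySem.Int.mod (y-2) 4 == 0 then d1.insert [x, y] "." else d1)
      d) d0
  d.items

-- ===== PORT B =====
def get_console_repr_of_board__1_alt (consolecharacters_table : List (List Int × String)) (xmin : Int) (ymin : Int) (xmax : Int) (ymax : Int) : List (List Int × String) :=
  let x0 := (xmin - 1) * 4
  let x1 := (xmax + 1) * 4
  let y0 := (ymin - 1) * 4
  let y1 := (ymax + 1) * 4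
  let d0 : PySem.Dict (List Int) String := ⟨consolecharacters_table⟩
  -- first pass: background character everywhere
  let dFill := (PySem.List.pyRange y0 y1 1).foldl (fun d y =>
    (PySem.List.pyRange x0 x1 1).foldl (fun d x => d.insert [x, y] " ") d) d0
  -- second pass: stride directly over the dot coordinates
  let dDot := (PySem.List.pyRange (y0+2) y1 4).foldl (fun d y =>
    (PySem.List.pyRange x0 x1 4).foldl (fun d x => d.insert [x, y] ".") d) dFill
  dDot.items

-- ===== PRECONDITION & SPEC =====
def Spec_get_console_repr_of_board__1 (consolecharacters_table : List (List Int × String)) (xmin : Int) (ymin : Int) (xmax : Int) (ymax : Int) (out : List (List Int × String)) : Prop := out = get_console_repr_of_board__1_alt consolecharacters_table xmin ymin xmax ymax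
instance (consolecharacters_table : List (List Int × String)) (xmin : Int) (ymin : Int) (xmax : Int) (ymax : Int) (out : List (List Int × String)) : Decidable (Spec_get_console_repr_of_board__1 consolecharacters_table xmin ymin xmax ymax out) := by unfold Spec_get_console_repr_of_board__1; infer_instance

-- ===== CLAIM (what is proved, stated in full; the proofs are below) =====
def Claim_equal_get_console_repr_of_board__1 : Prop := ∀ (consolecharacters_table : List (List Int × String)) (xmin : Int) (ymin : Int) (xmax : Int) (ymax : Int), Dom_get_console_repr_of_board__1 consolecharacters_table xmin ymin xmax ymax → Spec_get_console_repr_of_board__1 consolecharacters_table xmin ymin xmax ymax (get_console_repr_of_board__1 consolecharacters_table xmin ymin xmax ymax)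

-- ===== LEMMAS AND PROOFS =====

-- value-map over a dict: set value "." at every key satisfying p, keep structure
def pvMapD (p : List Int → Bool) (d : PySem.Dict (List Int) String) : PySem.Dict (List Int) String :=
  ⟨d.items.map (fun q => (q.1, if p q.1 then "." else q.2))⟩

def pvKey (c : Int × Int) : List Int := [c.1, c.2]

-- fill pass over an explicit list of cells
def pvFill (G : List (Int × Int)) (d : PySem.Dict (List Int) String) : PySem.Dict (List Int) String :=
  G.foldl (fun d c => d.insert (pvKey c) " ") d

theorem pvContains_mapD (p : List Int → Bool) (d : PySem.Dict (List Int) String) (k : List Int) :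
    (pvMapD p d).contains k = d.contains k := by
  simp [pvMapD, PySem.Dict.contains, List.any_map, Function.comp_def]

theorem pvMapD_insert (p : List Int → Bool) (d : PySem.Dict (List Int) String) (k : List Int) (v : String) :
    pvMapD p (d.insert k v) = (pvMapD p d).insert k (if p k then "." else v) := by
  by_cases h : d.contains k = true
  · rw [PySem.Dict.insert, PySem.Dict.insert, pvContains_mapD, if_pos h, if_pos h]
    simp only [pvMapD, List.map_map]
    refine congrArg _ (List.map_congr_left ?_)
    intro q _
    by_cases hk : q.1 = k
    · simp [Function.comp_def, hk]
    · simp [Function.comp_def, hk]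
  · rw [PySem.Dict.insert, PySem.Dict.insert, pvContains_mapD, if_neg h, if_neg h]
    simp [pvMapD]

theorem pvMapD_of_false (p : List Int → Bool) (d : PySem.Dict (List Int) String)
    (h : ∀ k, p k = false) : pvMapD p d = d := by
  simp [pvMapD, h]

theorem pvInsert_dot_eq_mapD (d : PySem.Dict (List Int) String) (k : List Int)
    (h : d.contains k = true) : d.insert k "." = pvMapD (fun k' => k' == k) d := by
  rw [PySem.Dict.insert, if_pos h]
  simp only [pvMapD]
  refine congrArg _ (List.map_congr_left ?_)
  intro q _
  by_cases hk : (q.1 == k) = true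
  · simp [hk, (beq_iff_eq).mp hk]
  · simp [hk]

theorem pvMapD_mapD (p q : List Int → Bool) (d : PySem.Dict (List Int) String) :
    pvMapD p (pvMapD q d) = pvMapD (fun k => q k || p k) d := by
  simp only [pvMapD, List.map_map]
  refine congrArg _ (List.map_congr_left ?_)
  intro x _
  by_cases hq : q x.1 <;> by_cases hp : p x.1 <;> simp [Function.comp_def, hq, hp]

theorem pvDotFoldl_eq_mapD (ks : List (List Int)) :
    ∀ d : PySem.Dict (List Int) String, (∀ k ∈ ks, d.contains k = true) →
    ks.foldl (fun d k => d.insert k ".") d = pvMapD (fun k' => ks.contains k') d := by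
  induction ks with
  | nil =>
      intro d _
      simp only [List.foldl_nil]
      exact (pvMapD_of_false _ d (by simp)).symm
  | cons k ks ih =>
      intro d h
      have hk : d.contains k = true := h k (by simp)
      simp only [List.foldl_cons]
      rw [pvInsert_dot_eq_mapD d k hk]
      rw [ih _ (fun k' hk' => by rw [pvContains_mapD]; exact h k' (by simp [hk']))]
      rw [pvMapD_mapD]
      refine congrArg (fun f => pvMapD f d) (funext fun k' => ?_)
      by_cases he : k' = k
      · simp [he]
      · have he' : ¬ (k == k') = true := by simpa using fun h => he (h.symm)
        simp [List.contains_cons, he, he']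

theorem pvContains_fill_mono (G : List (Int × Int)) :
    ∀ (d : PySem.Dict (List Int) String) (k : List Int), d.contains k = true →
    (pvFill G d).contains k = true := by
  induction G with
  | nil => intro d k h; simpa [pvFill] using h
  | cons c G ih =>
      intro d k h
      simp only [pvFill, List.foldl_cons]
      exact ih _ k (by rw [PySem.Dict.contains_insert]; simp [h])

theorem pvContains_fill_of_mem (G : List (Int × Int)) :
    ∀ (d : PySem.Dict (List Int) String) (c : Int × Int), c ∈ G →
    (pvFill G d).contains (pvKey c) = true := by
  induction G with
  | nil => intro _ _ h; simp at h
  | cons c0 G ih =>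
      intro d c hc
      rcases List.mem_cons.mp hc with h | h
      · subst h
        simp only [pvFill, List.foldl_cons]
        exact pvContains_fill_mono G _ _ (by rw [PySem.Dict.contains_insert]; simp)
      · simp only [pvFill, List.foldl_cons]
        exact ih _ c h

theorem pvMapD_fill (p : List Int → Bool) (G : List (Int × Int)) :
    ∀ d : PySem.Dict (List Int) String,
    pvMapD p (pvFill G d) =
      G.foldl (fun d c => d.insert (pvKey c) (if p (pvKey c) then "." else " ")) (pvMapD p d) := by
  induction G with
  | nil => intro d; simp [pvFill]
  | cons c G ih =>
      intro d
      simp only [pvFill, List.foldl_cons] at *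
      rw [ih, pvMapD_insert]

theorem pvInsert_mapD (p : List Int → Bool) (d : PySem.Dict (List Int) String) (k : List Int) (w : String) :
    (pvMapD p d).insert k w = pvMapD (fun k' => p k' && !(k' == k)) (d.insert k w) := by
  by_cases h : d.contains k = true
  · rw [PySem.Dict.insert, PySem.Dict.insert, pvContains_mapD, if_pos h, if_pos h]
    simp only [pvMapD, List.map_map]
    refine congrArg _ (List.map_congr_left ?_)
    intro q _
    by_cases hk : q.1 = k
    · simp [Function.comp_def, hk]
    · simp [Function.comp_def, hk]
  · rw [PySem.Dict.insert, PySem.Dict.insert, pvContains_mapD, if_neg h, if_neg h]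
    simp only [pvMapD, List.map_append]
    have h' : ∀ q ∈ d.items, (q.1 == k) = false := by
      intro q hq
      by_contra hc
      exact h (by simp only [PySem.Dict.contains, List.any_eq_true]; exact ⟨q, hq, by simpa using hc⟩)
    refine congrArg _ (congrArg₂ _ (List.map_congr_left ?_) (by simp))
    intro q hq
    simp [h' q hq]

theorem pvFoldl_cond_mapD (G : List (Int × Int)) (f : Int × Int → String) :
    ∀ (p : List Int → Bool) (d : PySem.Dict (List Int) String),
    (∀ k, p k = true → k ∈ G.map pvKey) →
    G.foldl (fun d c => d.insert (pvKey c) (f c)) (pvMapD p d) =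
      G.foldl (fun d c => d.insert (pvKey c) (f c)) d := by
  induction G with
  | nil =>
      intro p d h
      simp only [List.foldl_nil]
      exact pvMapD_of_false p d (fun k => by
        by_contra hk
        have := h k (by simpa using hk)
        simp at this)
  | cons c G ih =>
      intro p d h
      simp only [List.foldl_cons]
      rw [pvInsert_mapD]
      exact ih _ _ (fun k hk => by
        simp only [Bool.and_eq_true, Bool.not_eq_true'] at hk
        have hne : k ≠ pvKey c := by
          intro he; rw [he] at hk; simp at hk
        have := h k hk.1
        simp only [List.map_cons, List.mem_cons] at this
        exact this.resolve_left hne)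

-- ===== VERDICT (by name: the statement is the Claim_ definition above) =====
theorem get_console_repr_of_board__1_spec : Claim_equal_get_console_repr_of_board__1 := by
  intro t xmin ymin xmax ymax _
  unfold Spec_get_console_repr_of_board__1 get_console_repr_of_board__1 get_console_repr_of_board__1_alt
  simp only []
  set x0 := (xmin - 1) * 4 with hx0
  set x1 := (xmax + 1) * 4 with hx1
  set y0 := (ymin - 1) * 4 with hy0
  set y1 := (ymax + 1) * 4 with hy1
  set d0 : PySem.Dict (List Int) String := ⟨t⟩ with hd0
  -- the grid, flattened
  set G : List (Int × Int) :=
    (PySem.List.pyRange y0 y1 1).flatMap (fun y => (PySem.List.pyRange x0 x1 1).map (fun x => (x, y))) with hG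
  -- the dot keys, flattened
  set ks : List (List Int) :=
    (PySem.List.pyRange (y0+2) y1 4).flatMap (fun y => (PySem.List.pyRange x0 x1 4).map (fun x => [x, y])) with hks
  set p : List Int → Bool := fun k => ks.contains k with hp
  -- membership facts
  have hmemks : ∀ x y : Int, [x, y] ∈ ks ↔
      (x ∈ PySem.List.pyRange x0 x1 4 ∧ y ∈ PySem.List.pyRange (y0+2) y1 4) := by
    intro x y
    simp only [hks, List.mem_flatMap, List.mem_map]
    constructor
    · rintro ⟨y', hy', x', hx', he⟩
      obtain ⟨h1, h2⟩ : x' = x ∧ y' = y := by simpa using he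
      exact ⟨h1 ▸ hx', h2 ▸ hy'⟩
    · rintro ⟨hx, hy⟩; exact ⟨y, hy, x, hx, rfl⟩
  have hksG : ∀ k, p k = true → k ∈ G.map pvKey := by
    intro k hk
    simp only [hp, List.contains_iff_mem] at hk
    simp only [hks, List.mem_flatMap, List.mem_map] at hk
    obtain ⟨y, hy, x, hx, he⟩ := hk
    rw [PySem.List.mem_pyRange_iff_of_pos (by norm_num)] at hx hy
    have hxG : x ∈ PySem.List.pyRange x0 x1 1 := by
      rw [PySem.List.mem_pyRange_one]; omega
    have hyG : y ∈ PySem.List.pyRange y0 y1 1 := by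
      rw [PySem.List.mem_pyRange_one]; omega
    subst he
    simp only [hG, List.map_flatMap, List.map_map, List.mem_flatMap, List.mem_map]
    exact ⟨y, hyG, x, hxG, rfl⟩
  -- A as a single fold with a conditional value
  have hA : (PySem.List.pyRange y0 y1 1).foldl (fun d y =>
      (PySem.List.pyRange x0 x1 1).foldl (fun d x =>
        let d1 := d.insert [x, y] " "
        if PySem.Int.mod x 4 == 0 && PySem.Int.mod (y-2) 4 == 0 then d1.insert [x, y] "." else d1) d) d0
      = G.foldl (fun d c => d.insert (pvKey c) (if p (pvKey c) then "." else " ")) d0 := by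
    rw [hG, List.foldl_flatMap]
    refine PySem.List.foldl_congr_mem _ _ _ _ ?_
    intro d y hy
    rw [List.foldl_map]
    refine PySem.List.foldl_congr_mem _ _ _ _ ?_
    intro d' x hx
    have hcond : (PySem.Int.mod x 4 == 0 && PySem.Int.mod (y-2) 4 == 0) = p [x, y] := by
      rw [PySem.List.mem_pyRange_one] at hx hy
      have hm1 : PySem.Int.mod x 4 = x % 4 := by
        simp [PySem.Int.mod, Int.fmod_eq_emod]
      have hm2 : PySem.Int.mod (y-2) 4 = (y-2) % 4 := by
        simp [PySem.Int.mod, Int.fmod_eq_emod]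
      have hpm : p [x, y] = true ↔ (x ∈ PySem.List.pyRange x0 x1 4 ∧ y ∈ PySem.List.pyRange (y0+2) y1 4) := by
        rw [hp, List.contains_iff_mem]; exact hmemks x y
      rw [Bool.eq_iff_iff]
      rw [hpm, PySem.List.mem_pyRange_iff_of_pos (by norm_num), PySem.List.mem_pyRange_iff_of_pos (by norm_num)]
      simp only [Bool.and_eq_true, beq_iff_eq, hm1, hm2]
      constructor
      · rintro ⟨h1, h2⟩
        refine ⟨⟨hx.1, hx.2, ?_⟩, ?_, hy.2, ?_⟩ <;> omega
      · rintro ⟨⟨_, _, h1⟩, h2, _, h3⟩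
        constructor <;> omega
    rw [hcond]
    by_cases hpk : p [x, y] = true
    · simp [hpk, pvKey, PySem.Dict.insert_insert_self]
    · simp [hpk, pvKey]
  rw [hA]
  -- B: fill pass then dot pass
  have hBfill : (PySem.List.pyRange y0 y1 1).foldl (fun d y =>
      (PySem.List.pyRange x0 x1 1).foldl (fun d x => d.insert [x, y] " ") d) d0 = pvFill G d0 := by
    rw [hG, pvFill, List.foldl_flatMap]
    refine (PySem.List.foldl_congr_mem _ _ _ _ ?_).symm
    intro d y _
    rw [List.foldl_map]
    rfl
  have hBdot : (PySem.List.pyRange (y0+2) y1 4).foldl (fun d y =>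
      (PySem.List.pyRange x0 x1 4).foldl (fun d x => d.insert [x, y] ".") d) (pvFill G d0)
      = ks.foldl (fun d k => d.insert k ".") (pvFill G d0) := by
    rw [hks, List.foldl_flatMap]
    refine (PySem.List.foldl_congr_mem _ _ _ _ ?_).symm
    intro d y _
    rw [List.foldl_map]
  rw [hBfill, hBdot]
  have hcontains : ∀ k ∈ ks, (pvFill G d0).contains k = true := by
    intro k hk
    have hk' : k ∈ G.map pvKey := hksG k (by simp [hp, List.contains_iff_mem, hk])
    simp only [List.mem_map] at hk'
    obtain ⟨c, hc, he⟩ := hk'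
    exact he ▸ pvContains_fill_of_mem G d0 c hc
  rw [pvDotFoldl_eq_mapD ks (pvFill G d0) hcontains]
  rw [pvMapD_fill, pvFoldl_cond_mapD G _ p d0 hksG]
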